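-- pv_equiv track=rewrite | github.com/Aadhik611/ColumnarTranspositionCipherPython | main.py | convert_string_to_matrix
-- ===== SOURCE A (Python) =====
-- string_to_hash = "Hello world!"
--
-- def convert_string_to_matrix(matrix, matrix_level):
--     for v in string_to_hash:
--         if len(matrix[matrix_level]) == 5:
--             matrix_level = matrix_level + 1
--             matrix.append([v])
--         else:
--             matrix[matrix_level].append(v)
--
--     return matrix, matrix_level
-- ===== SOURCE B (Python) =====
-- string_to_hash = "Hello world!"
--
-- ROW_LEN = 5
--
-- def convert_string_to_matrix(matrix, matrix_level):
--     pending = list(string_to_hash)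
--     while pending:
--         row = matrix[matrix_level]
--         while pending and len(row) != ROW_LEN:
--             row.append(pending.pop(0))
--         if pending:
--             matrix.append([pending.pop(0)])
--             matrix_level += 1
--     return matrix, matrix_level
-- ===== Notes on version B (the rewrite author's own statement) =====
-- stated objective: alternative
-- what changed: A is a flat per-character loop carrying matrix_level as state with an '== 5' branch per character; B is a per-row decomposition over an explicit pending queue: an inner loop fills the current row until full, then the outer loop opens a new row seeded with the next pending character. Pre_ excludes only inputs where matrix[matrix_level] raises IndexError.
import Mathlib
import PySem

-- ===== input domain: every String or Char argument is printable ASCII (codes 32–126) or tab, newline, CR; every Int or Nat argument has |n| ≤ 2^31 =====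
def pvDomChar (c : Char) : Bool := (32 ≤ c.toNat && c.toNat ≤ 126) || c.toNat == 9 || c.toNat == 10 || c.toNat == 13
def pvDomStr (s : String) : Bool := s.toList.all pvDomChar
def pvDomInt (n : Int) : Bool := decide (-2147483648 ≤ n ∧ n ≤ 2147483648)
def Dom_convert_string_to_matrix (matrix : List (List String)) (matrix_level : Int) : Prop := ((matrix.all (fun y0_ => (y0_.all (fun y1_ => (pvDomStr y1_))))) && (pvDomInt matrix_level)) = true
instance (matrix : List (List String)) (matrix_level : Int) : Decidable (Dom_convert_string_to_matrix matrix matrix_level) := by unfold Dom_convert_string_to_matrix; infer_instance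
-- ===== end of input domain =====

-- B replaces A's flat per-character loop with a per-row decomposition (inner loop fills the
-- current row until full, outer loop opens a new row seeded with the next pending character);
-- objective: alternative decomposition, same cost. Both Pythons mutate `matrix` in place in
-- the same way; the equivalence proved here is about the RETURN value.

-- the module-level constant `string_to_hash = "Hello world!"`, as the list of the
-- 1-character strings Python iteration yields (shared by both ports, as in Python)
def string_to_hash : List String := ["H", "e", "l", "l", "o", " ", "w", "o", "r", "l", "d", "!"]

-- ===== PORT A =====
-- one iteration of A's `for v in string_to_hash` body; `none` = IndexError already raised
def stepA (st : Option (List (List String) × Int)) (v : String) :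
    Option (List (List String) × Int) :=
  match st with
  | none => none
  | some (m, i) =>
    match PySem.List.pyGet? m i with   -- matrix[matrix_level]; none = IndexError
    | none => none
    | some row =>
      if row.length = 5 then
        some (m ++ [[v]], i + 1)       -- matrix_level += 1; matrix.append([v])
      else
        some (PySem.List.pySetD m i (row ++ [v]), i)   -- matrix[matrix_level].append(v); index known in range

def convert_string_to_matrix (matrix : List (List String)) (matrix_level : Int) :
    List (List String) × Int :=
  (string_to_hash.foldl stepA (some (matrix, matrix_level))).getD ([], 0)  -- getD unreachable under Pre_

-- ===== PORT B =====
-- B's inner loop `while pending and len(row) != ROW_LEN: row.append(pending.pop(0))`;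
-- returns (remaining pending, the grown row)
def fill (pending : List String) (row : List String) : List String × List String :=
  match pending with
  | [] => (pending, row)
  | v :: rest => if row.length = 5 then (pending, row) else fill rest (row ++ [v])

-- needed by loopB's decreasing_by: fill never lengthens the pending queue
theorem fill_length_le (pending row : List String) :
    (fill pending row).1.length ≤ pending.length := by
  induction pending generalizing row with
  | nil => simp [fill]
  | cons v rest ih =>
    simp only [fill]
    split
    · exact le_rfl
    · exact (ih (row ++ [v])).trans (by simp)

-- B's outer `while pending:` loop; `none` = IndexError
def loopB (pending : List String) (m : List (List String)) (i : Int) :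
    Option (List (List String) × Int) :=
  match pending with
  | [] => some (m, i)
  | v :: tail =>
    match PySem.List.pyGet? m i with   -- row = matrix[matrix_level]
    | none => none
    | some row =>
      let res := fill (v :: tail) row            -- inner fill loop (row mutated in place)
      let m' := PySem.List.pySetD m i res.2      -- the grown row, written back at its index
      match hr : res.1 with
      | [] => some (m', i)
      | w :: rest' => loopB rest' (m' ++ [[w]]) (i + 1)   -- matrix.append([pending.pop(0)]); matrix_level += 1
termination_by pending.length
decreasing_by
  have h := fill_length_le (v :: tail) row
  rw [hr] at h
  simp only [List.length_cons] at h ⊢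
  omega

def convert_string_to_matrix_alt (matrix : List (List String)) (matrix_level : Int) :
    List (List String) × Int :=
  (loopB string_to_hash matrix matrix_level).getD ([], 0)  -- getD unreachable under Pre_

-- ===== PRECONDITION & SPEC =====
-- Pre_ excludes exactly the inputs on which A raises IndexError: a matrix_level outside
-- Python's (negative-wrapping) index range of `matrix`.
def Pre_convert_string_to_matrix (matrix : List (List String)) (matrix_level : Int) : Prop :=
  PySem.Raise.InRange matrix.length matrix_level
instance (matrix : List (List String)) (matrix_level : Int) : Decidable (Pre_convert_string_to_matrix matrix matrix_level) := by unfold Pre_convert_string_to_matrix; infer_instance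

def pvWitness_convert_string_to_matrix : List (List String) × Int := ([["a", "b"]], 0)

def Spec_convert_string_to_matrix (matrix : List (List String)) (matrix_level : Int) (out : List (List String) × Int) : Prop := out = convert_string_to_matrix_alt matrix matrix_level
instance (matrix : List (List String)) (matrix_level : Int) (out : List (List String) × Int) : Decidable (Spec_convert_string_to_matrix matrix matrix_level out) := by unfold Spec_convert_string_to_matrix; infer_instance

-- ===== CLAIM (what is proved, stated in full; the proofs are below) =====
def Claim_equal_convert_string_to_matrix : Prop := ∀ (matrix : List (List String)) (matrix_level : Int), Dom_convert_string_to_matrix matrix matrix_level → Pre_convert_string_to_matrix matrix matrix_level → Spec_convert_string_to_matrix matrix matrix_level (convert_string_to_matrix matrix matrix_level)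

-- ===== LEMMAS AND PROOFS =====

theorem pvIdx_lt {n : Nat} {i : Int} {k : Nat} (h : PySem.List.pyIdx? n i = some k) : k < n := by
  simp only [PySem.List.pyIdx?] at h
  split_ifs at h <;> simp_all <;> omega

theorem pvGet_of_idx {α : Type} {m : List α} {i : Int} {k : Nat}
    (h : PySem.List.pyIdx? m.length i = some k) :
    PySem.List.pyGet? m i = some (m[k]'(pvIdx_lt h)) := by
  simp [PySem.List.pyGet?, h, List.getElem?_eq_getElem (pvIdx_lt h)]

theorem pvSet_of_idx {α : Type} {m : List α} {i : Int} {k : Nat} (v : α)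
    (h : PySem.List.pyIdx? m.length i = some k) :
    PySem.List.pySetD m i v = m.set k v := by
  simp [PySem.List.pySetD, PySem.List.pySet?, h]

theorem pvIdx_set {α : Type} {m : List α} {i : Int} {k : Nat} (v : α)
    (h : PySem.List.pyIdx? m.length i = some k) :
    PySem.List.pyIdx? (m.set k v).length i = some k := by
  simpa using h

theorem pvGet_eq_some_iff {α : Type} {m : List α} {i : Int} {row : α} :
    PySem.List.pyGet? m i = some row ↔
      ∃ k, PySem.List.pyIdx? m.length i = some k ∧ ∃ (hk : k < m.length), m[k] = row := by
  constructor
  · intro h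
    simp only [PySem.List.pyGet?, Option.bind_eq_some_iff] at h
    obtain ⟨k, hk, hg⟩ := h
    exact ⟨k, hk, pvIdx_lt hk, by simpa [List.getElem?_eq_getElem (pvIdx_lt hk)] using hg⟩
  · rintro ⟨k, hk, hlt, rfl⟩
    exact pvGet_of_idx hk

-- reduction lemmas for stepA
theorem stepA_get_none {m : List (List String)} {i : Int} (v : String)
    (hg : PySem.List.pyGet? m i = none) : stepA (some (m, i)) v = none := by
  simp [stepA, hg]

theorem stepA_eq5 {m : List (List String)} {i : Int} {row : List String} (v : String)
    (hg : PySem.List.pyGet? m i = some row) (h5 : row.length = 5) :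
    stepA (some (m, i)) v = some (m ++ [[v]], i + 1) := by
  simp [stepA, hg, h5]

theorem stepA_ne5 {m : List (List String)} {i : Int} {row : List String} (v : String)
    (hg : PySem.List.pyGet? m i = some row) (h5 : ¬ row.length = 5) :
    stepA (some (m, i)) v = some (PySem.List.pySetD m i (row ++ [v]), i) := by
  simp [stepA, hg, h5]

theorem foldl_stepA_none (s : List String) : s.foldl stepA none = none := by
  induction s with
  | nil => rfl
  | cons v rest ih => simpa [stepA] using ih

-- reduction lemmas for loopB
theorem loopB_nil (m : List (List String)) (i : Int) : loopB [] m i = some (m, i) := by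
  rw [loopB]

theorem loopB_cons_none {m : List (List String)} {i : Int} (v : String) (tail : List String)
    (hg : PySem.List.pyGet? m i = none) : loopB (v :: tail) m i = none := by
  rw [loopB, hg]

theorem loopB_cons_fillnil {m : List (List String)} {i : Int} {row : List String}
    (v : String) (tail : List String) (hg : PySem.List.pyGet? m i = some row)
    (hr2 : (fill (v :: tail) row).1 = []) :
    loopB (v :: tail) m i = some (PySem.List.pySetD m i (fill (v :: tail) row).2, i) := by
  rw [loopB.eq_def, hg]
  simp only []
  split
  · rfl
  · rename_i w2 r2 h; rw [hr2] at h; cases h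

theorem loopB_cons_fillcons {m : List (List String)} {i : Int} {row : List String}
    (v : String) (tail : List String) (hg : PySem.List.pyGet? m i = some row)
    {w : String} {rest' : List String} (hr2 : (fill (v :: tail) row).1 = w :: rest') :
    loopB (v :: tail) m i =
      loopB rest' (PySem.List.pySetD m i (fill (v :: tail) row).2 ++ [[w]]) (i + 1) := by
  rw [loopB.eq_def, hg]
  simp only []
  split
  · rename_i h; rw [hr2] at h; cases h
  · rename_i w2 r2 h; rw [hr2] at h; cases h; rfl

-- if fill stops with pending left over, the row it built is full
theorem fill_stop_full (pending row : List String) {w : String} {rest' : List String}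
    (h : (fill pending row).1 = w :: rest') : (fill pending row).2.length = 5 := by
  induction pending generalizing row with
  | nil => simp [fill] at h
  | cons v rest ih =>
    simp only [fill] at h ⊢
    split at h
    · rename_i h5; simp [h5]
    · rename_i h5; rw [if_neg h5]; exact ih _ h
  
-- A's fold performs exactly fill's appends while the current row is not full
theorem fold_fill (pending : List String) : ∀ (m : List (List String)) (i : Int) (k : Nat)
    (hk : PySem.List.pyIdx? m.length i = some k),
    pending.foldl stepA (some (m, i)) =
      (fill pending (m[k]'(pvIdx_lt hk))).1.foldl stepA
        (some (m.set k (fill pending (m[k]'(pvIdx_lt hk))).2, i)) := by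
  induction pending with
  | nil => intro m i k hk; simp [fill, List.set_getElem_self]
  | cons v rest ih =>
    intro m i k hk
    have hlt := pvIdx_lt hk
    by_cases h5 : (m[k]'hlt).length = 5
    · simp [fill, h5, List.set_getElem_self]
    · have hstep := stepA_ne5 v (pvGet_of_idx hk) h5
      rw [List.foldl_cons, hstep, pvSet_of_idx _ hk]
      have hk' : PySem.List.pyIdx? ((m.set k ((m[k]'hlt) ++ [v]))).length i = some k :=
        pvIdx_set _ hk
      have hg' : ((m.set k ((m[k]'hlt) ++ [v])))[k]'(pvIdx_lt hk') = (m[k]'hlt) ++ [v] :=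
        List.getElem_set_self (by simpa using hlt)
      rw [ih _ i k hk', hg', List.set_set]
      simp [fill, h5]

-- main loop correspondence: A's per-character fold equals B's per-row loop, from any state
theorem foldl_eq_loopB (n : Nat) : ∀ (pending : List String), pending.length ≤ n →
    ∀ (m : List (List String)) (i : Int),
    pending.foldl stepA (some (m, i)) = loopB pending m i := by
  induction n with
  | zero =>
    intro s hs m i
    have : s = [] := List.length_eq_zero_iff.mp (by omega)
    subst this
    rw [List.foldl_nil, loopB_nil]
  | succ n ih =>
    intro s hs m i
    match s with
    | [] => rw [List.foldl_nil, loopB_nil]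
    | v :: tail =>
      cases hg : PySem.List.pyGet? m i with
      | none =>
        rw [List.foldl_cons, stepA_get_none v hg, foldl_stepA_none, loopB_cons_none v tail hg]
      | some row =>
        obtain ⟨k, hk, hlt, hrow⟩ := pvGet_eq_some_iff.mp hg
        have hfold := fold_fill (v :: tail) m i k hk
        rw [hrow] at hfold
        cases hr : (fill (v :: tail) row).1 with
        | nil =>
          rw [loopB_cons_fillnil v tail hg hr, hfold, hr, List.foldl_nil, pvSet_of_idx _ hk]
        | cons w rest' =>
          rw [loopB_cons_fillcons v tail hg hr, hfold, hr, List.foldl_cons]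
          -- the written-back row is full, so A's next step spawns a new row
          have hk' : PySem.List.pyIdx? (m.set k (fill (v :: tail) row).2).length i = some k :=
            pvIdx_set _ hk
          have hg' : PySem.List.pyGet? (m.set k (fill (v :: tail) row).2) i =
              some (fill (v :: tail) row).2 := by
            have := pvGet_of_idx hk'
            rwa [show (m.set k (fill (v :: tail) row).2)[k]'(pvIdx_lt hk') =
                (fill (v :: tail) row).2 from
              List.getElem_set_self (by simpa using hlt)] at this
          rw [stepA_eq5 w hg' (fill_stop_full _ _ hr)]
          have hlen : rest'.length ≤ n := by
            have h1 := fill_length_le (v :: tail) row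
            rw [hr] at h1
            simp only [List.length_cons] at h1 hs
            omega
          rw [ih rest' hlen, pvSet_of_idx _ hk]

-- ===== VERDICT (by name: the statement is the Claim_ definition above) =====
theorem convert_string_to_matrix_spec : Claim_equal_convert_string_to_matrix := by
  intro matrix matrix_level _hDom _hPre
  unfold Spec_convert_string_to_matrix convert_string_to_matrix convert_string_to_matrix_alt
  rw [foldl_eq_loopB string_to_hash.length string_to_hash le_rfl]
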